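-- pv_equiv track=rewrite | github.com/laivii/TIRA-24 | Viikko 3/samebit.py | count
-- ===== SOURCE A (Python) =====
-- def count(s):
--     zeros = 0
--     ones = 0
--
--     for i in s:
--         if i == "0":
--             zeros += 1
--         else:
--             ones += 1
--
--     zeros = (zeros * ( zeros - 1 )) // 2
--     ones = (ones * ( ones - 1 )) // 2
--
--     return zeros + ones
-- ===== SOURCE B (Python) =====
-- def count(s):
--     zeros = 0
--     ones = 0
--     pairs = 0
--     for c in s:
--         if c == "0":
--             pairs += zeros
--             zeros += 1
--         else:
--             pairs += ones
--             ones += 1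
--     return pairs
-- ===== Notes on version B (the rewrite author's own statement) =====
-- stated objective: alternative
-- what changed: B accumulates same-bit pairs incrementally (pairs += count-so-far of the matching bit) instead of counting totals and applying the binomial formula n*(n-1)//2 at the end; no final multiply/divide.
import Mathlib
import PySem

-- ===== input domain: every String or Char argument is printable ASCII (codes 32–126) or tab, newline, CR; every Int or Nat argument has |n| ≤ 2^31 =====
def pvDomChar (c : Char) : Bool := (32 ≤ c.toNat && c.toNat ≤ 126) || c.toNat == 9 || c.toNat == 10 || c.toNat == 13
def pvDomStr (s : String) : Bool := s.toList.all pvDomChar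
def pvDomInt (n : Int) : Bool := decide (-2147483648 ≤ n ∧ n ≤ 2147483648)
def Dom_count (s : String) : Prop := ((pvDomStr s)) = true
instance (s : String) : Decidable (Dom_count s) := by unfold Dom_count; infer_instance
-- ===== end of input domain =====

-- B accumulates same-bit pairs incrementally instead of A's count-totals-then-binomial-formula.

-- ===== PORT A =====
def count (s : String) : Int :=
  let zo : Int × Int :=
    s.toList.foldl (fun zo c => if c = '0' then (zo.1 + 1, zo.2) else (zo.1, zo.2 + 1)) (0, 0)
  let zeros := PySem.Int.floordiv (zo.1 * (zo.1 - 1)) 2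
  let ones := PySem.Int.floordiv (zo.2 * (zo.2 - 1)) 2
  zeros + ones

-- ===== PORT B =====
def count_alt (s : String) : Int :=
  (s.toList.foldl
    (fun st c =>
      if c = '0' then (st.1 + 1, st.2.1, st.2.2 + st.1)
      else (st.1, st.2.1 + 1, st.2.2 + st.2.1))
    ((0 : Int), (0 : Int), (0 : Int))).2.2

-- ===== PRECONDITION & SPEC =====
def Spec_count (s : String) (out : Int) : Prop := out = count_alt s
instance (s : String) (out : Int) : Decidable (Spec_count s out) := by unfold Spec_count; infer_instance

-- ===== CLAIM (what is proved, stated in full; the proofs are below) =====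
def Claim_equal_count : Prop := ∀ (s : String), Dom_count s → Spec_count s (count s)

-- ===== LEMMAS AND PROOFS =====

-- Invariant: B's fold tracks A's counts in its first two components, and its
-- pairs component stays 2*p = z*(z-1)+o*(o-1) shifted by the start value.
theorem count_fold_inv (l : List Char) (z o p : Int) (h : 2 * p = z * (z - 1) + o * (o - 1)) :
    (l.foldl
      (fun st c =>
        if c = '0' then (st.1 + 1, st.2.1, st.2.2 + st.1)
        else (st.1, st.2.1 + 1, st.2.2 + st.2.1))
      (z, o, p)).2.2 =
    (let zo := l.foldl (fun zo c => if c = '0' then (zo.1 + 1, zo.2) else (zo.1, zo.2 + 1)) (z, o)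
     PySem.Int.floordiv (zo.1 * (zo.1 - 1)) 2 + PySem.Int.floordiv (zo.2 * (zo.2 - 1)) 2) := by
  induction l generalizing z o p with
  | nil =>
      simp only [List.foldl]
      have hz : PySem.Int.floordiv (z * (z - 1)) 2 = (z * (z - 1)) / 2 :=
        PySem.Int.floordiv_eq_ediv_of_pos (by omega)
      have ho : PySem.Int.floordiv (o * (o - 1)) 2 = (o * (o - 1)) / 2 :=
        PySem.Int.floordiv_eq_ediv_of_pos (by omega)
      obtain ⟨kz, hkz⟩ := Int.even_mul_succ_self (z - 1)
      obtain ⟨ko, hko⟩ := Int.even_mul_succ_self (o - 1)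
      rw [hz, ho]
      have hz' : z * (z - 1) = 2 * kz := by linarith [hkz]
      have ho' : o * (o - 1) = 2 * ko := by linarith [hko]
      omega
  | cons c t ih =>
      simp only [List.foldl]
      by_cases hc : c = '0' <;> simp only [hc, if_pos, ite_false] <;>
        [exact ih (z + 1) o (p + z) (by ring_nf; ring_nf at h; omega);
         exact ih z (o + 1) (p + o) (by ring_nf; ring_nf at h; omega)]

-- ===== VERDICT (by name: the statement is the Claim_ definition above) =====
theorem count_spec : Claim_equal_count := by
  intro s _
  unfold Spec_count count count_alt
  exact (count_fold_inv s.toList 0 0 0 (by ring)).symm
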